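-- pv_equiv track=rewrite | github.com/evarexis/HnR2026_PCB_Debugger | src/schematic_summary.py | _classify_component
-- ===== SOURCE A (Python) =====
-- def _classify_component(ref: str, lib_id: str) -> str:
--     """Classify component type from reference and library ID"""
--     ref_upper = ref.upper()
--     lib_lower = lib_id.lower()
--
--     if ref_upper.startswith('U'):
--         if any(kw in lib_lower for kw in ['555', 'timer']):
--             return "timer_ic"
--         elif any(kw in lib_lower for kw in ['stm32', 'esp32', 'atmega', 'pic', 'mcu']):
--             return "microcontroller"
--         elif any(kw in lib_lower for kw in ['regulator', 'ldo']):
--             return "voltage_regulator"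
--         elif any(kw in lib_lower for kw in ['opamp', 'amplifier']):
--             return "opamp"
--         else:
--             return "ic"
--     elif ref_upper.startswith('R'):
--         return "resistor"
--     elif ref_upper.startswith('C'):
--         return "capacitor"
--     elif ref_upper.startswith('L'):
--         return "inductor"
--     elif ref_upper.startswith('D'):
--         return "diode"
--     elif ref_upper.startswith('Q'):
--         return "transistor"
--     elif ref_upper.startswith(('Y', 'X')):
--         return "crystal_oscillator"
--     elif ref_upper.startswith('J'):
--         return "connector"
--     elif ref_upper.startswith('SW'):
--         return "switch"
--     elif ref_upper.startswith('LED'):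
--         return "led"
--     elif ref_upper.startswith('TP'):
--         return "test_point"
--     else:
--         return "unknown"
-- ===== SOURCE B (Python) =====
-- # Hash-dispatch re-implementation: one dict lookup on the (uppercased) first
-- # character plus tiny special cases, and a flat first-match keyword table for
-- # 'U' refs, instead of a 15-branch if-elif cascade of startswith tests.
--
-- _SINGLE_CHAR = {
--     'R': 'resistor', 'C': 'capacitor', 'L': 'inductor', 'D': 'diode',
--     'Q': 'transistor', 'Y': 'crystal_oscillator', 'X': 'crystal_oscillator',
--     'J': 'connector',
-- }
--
-- # Flat ordered keyword table: the first keyword found in lib_lower decides.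
-- # Correct vs A's grouped checks because keywords of an earlier group appear
-- # before every keyword of a later group.
-- _KEYWORDS = [
--     ('555', 'timer_ic'), ('timer', 'timer_ic'),
--     ('stm32', 'microcontroller'), ('esp32', 'microcontroller'),
--     ('atmega', 'microcontroller'), ('pic', 'microcontroller'),
--     ('mcu', 'microcontroller'),
--     ('regulator', 'voltage_regulator'), ('ldo', 'voltage_regulator'),
--     ('opamp', 'opamp'), ('amplifier', 'opamp'),
-- ]
--
-- def _classify_component(ref: str, lib_id: str) -> str:
--     head = ref[:1].upper()
--     if head == 'U':
--         lib_lower = lib_id.lower()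
--         return next((label for kw, label in _KEYWORDS if kw in lib_lower), 'ic')
--     second = ref[1:2].upper()
--     return _SINGLE_CHAR.get(head,
--         'switch' if head == 'S' and second == 'W' else
--         'test_point' if head == 'T' and second == 'P' else
--         'unknown')
-- ===== Notes on version B (the rewrite author's own statement) =====
-- stated objective: idiomatic
-- what changed: Replaces the 15-branch if-elif startswith cascade by a dictionary dispatch on the uppercased first character (with two tiny second-character special cases for SW/TP), and replaces the four grouped any()-keyword checks for 'U' refs by a single flat ordered keyword table scanned for the first keyword contained in lib_id.lower().
import Mathlib
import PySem

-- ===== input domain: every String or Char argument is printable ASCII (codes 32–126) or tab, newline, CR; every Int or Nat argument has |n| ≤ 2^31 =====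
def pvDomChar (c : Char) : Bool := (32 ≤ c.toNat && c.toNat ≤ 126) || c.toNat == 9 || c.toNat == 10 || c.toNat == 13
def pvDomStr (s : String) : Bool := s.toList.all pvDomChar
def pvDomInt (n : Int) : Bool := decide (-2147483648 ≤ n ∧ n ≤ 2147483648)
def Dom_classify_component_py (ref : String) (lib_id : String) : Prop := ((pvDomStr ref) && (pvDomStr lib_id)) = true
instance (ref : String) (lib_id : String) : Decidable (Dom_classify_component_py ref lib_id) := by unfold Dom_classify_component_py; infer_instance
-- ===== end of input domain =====

-- B replaces the if-elif startswith cascade by a dict dispatch on the uppercased first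
-- character (plus two two-character special cases) and a flat first-match keyword table
-- for 'U' refs (idiomatic); same return value everywhere.
-- ===== PORT A =====
def classify_component_py (ref : String) (lib_id : String) : String :=
  let ref_upper := PySem.Str.upper ref
  let lib_lower := PySem.Str.lower lib_id
  if PySem.Str.startswith ref_upper "U" then
    if (["555", "timer"] : List String).any (fun kw => PySem.Str.isIn kw lib_lower) then "timer_ic"
    else if (["stm32", "esp32", "atmega", "pic", "mcu"] : List String).any (fun kw => PySem.Str.isIn kw lib_lower) then "microcontroller"
    else if (["regulator", "ldo"] : List String).any (fun kw => PySem.Str.isIn kw lib_lower) then "voltage_regulator"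
    else if (["opamp", "amplifier"] : List String).any (fun kw => PySem.Str.isIn kw lib_lower) then "opamp"
    else "ic"
  else if PySem.Str.startswith ref_upper "R" then "resistor"
  else if PySem.Str.startswith ref_upper "C" then "capacitor"
  else if PySem.Str.startswith ref_upper "L" then "inductor"
  else if PySem.Str.startswith ref_upper "D" then "diode"
  else if PySem.Str.startswith ref_upper "Q" then "transistor"
  else if PySem.Str.startswith ref_upper "Y" || PySem.Str.startswith ref_upper "X" then "crystal_oscillator"
  else if PySem.Str.startswith ref_upper "J" then "connector"
  else if PySem.Str.startswith ref_upper "SW" then "switch"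
  else if PySem.Str.startswith ref_upper "LED" then "led"
  else if PySem.Str.startswith ref_upper "TP" then "test_point"
  else "unknown"

-- ===== PORT B =====
-- _SINGLE_CHAR: dict from uppercased first character to label
def pvSingleChar : PySem.Dict String String :=
  PySem.Dict.ofList
    [ ("R", "resistor"), ("C", "capacitor"), ("L", "inductor"), ("D", "diode"),
      ("Q", "transistor"), ("Y", "crystal_oscillator"), ("X", "crystal_oscillator"),
      ("J", "connector") ]

-- _KEYWORDS: flat ordered keyword table, first keyword found in lib_lower decides
def pvKeywords : List (String × String) :=
  [ ("555", "timer_ic"), ("timer", "timer_ic"),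
    ("stm32", "microcontroller"), ("esp32", "microcontroller"),
    ("atmega", "microcontroller"), ("pic", "microcontroller"),
    ("mcu", "microcontroller"),
    ("regulator", "voltage_regulator"), ("ldo", "voltage_regulator"),
    ("opamp", "opamp"), ("amplifier", "opamp") ]

-- next((label for kw, label in _KEYWORDS if kw in lib_lower), 'ic')
def pvFirstKw (lib_lower : String) : List (String × String) → String
  | [] => "ic"
  | (kw, label) :: rest =>
    if PySem.Str.isIn kw lib_lower then label else pvFirstKw lib_lower rest

def classify_component_py_alt (ref : String) (lib_id : String) : String :=
  let head := PySem.Str.upper (PySem.Str.slice ref none (some 1))   -- ref[:1].upper()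
  if head == "U" then
    pvFirstKw (PySem.Str.lower lib_id) pvKeywords
  else
    let second := PySem.Str.upper (PySem.Str.slice ref (some 1) (some 2))   -- ref[1:2].upper()
    (PySem.Dict.get? pvSingleChar head).getD
      (if head == "S" && second == "W" then "switch"
       else if head == "T" && second == "P" then "test_point"
       else "unknown")

-- ===== PRECONDITION & SPEC =====
def Spec_classify_component_py (ref : String) (lib_id : String) (out : String) : Prop := out = classify_component_py_alt ref lib_id
instance (ref : String) (lib_id : String) (out : String) : Decidable (Spec_classify_component_py ref lib_id out) := by unfold Spec_classify_component_py; infer_instance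

-- ===== CLAIM (what is proved, stated in full; the proofs are below) =====
def Claim_equal_classify_component_py : Prop := ∀ (ref : String) (lib_id : String), Dom_classify_component_py ref lib_id → Spec_classify_component_py ref lib_id (classify_component_py ref lib_id)

-- ===== LEMMAS AND PROOFS =====
theorem str_beq_toList (s t : String) : (s == t) = decide (s.toList = t.toList) := by
  cases h : s == t <;> simp_all [String.toList_inj]

theorem tl_U : ("U":String).toList = ['U'] := rfl
theorem tl_R : ("R":String).toList = ['R'] := rfl
theorem tl_C : ("C":String).toList = ['C'] := rfl
theorem tl_L : ("L":String).toList = ['L'] := rfl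
theorem tl_D : ("D":String).toList = ['D'] := rfl
theorem tl_Q : ("Q":String).toList = ['Q'] := rfl
theorem tl_Y : ("Y":String).toList = ['Y'] := rfl
theorem tl_X : ("X":String).toList = ['X'] := rfl
theorem tl_J : ("J":String).toList = ['J'] := rfl
theorem tl_S : ("S":String).toList = ['S'] := rfl
theorem tl_W : ("W":String).toList = ['W'] := rfl
theorem tl_T : ("T":String).toList = ['T'] := rfl
theorem tl_P : ("P":String).toList = ['P'] := rfl
theorem tl_SW : ("SW":String).toList = ['S','W'] := rfl
theorem tl_LED : ("LED":String).toList = ['L','E','D'] := rfl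
theorem tl_TP : ("TP":String).toList = ['T','P'] := rfl

theorem sw_cons (c : Char) (t : List Char) (p : Char) (ps : List Char) :
    PySem.Chars.startswith (c :: t) (p :: ps) = (p == c && PySem.Chars.startswith t ps) := by
  simp [PySem.Chars.startswith, List.isPrefixOf]

theorem sw_nilp (t : List Char) : PySem.Chars.startswith t [] = true := by
  cases t <;> simp [PySem.Chars.startswith, List.isPrefixOf]

theorem sw_nil (p : Char) (ps : List Char) : PySem.Chars.startswith [] (p :: ps) = false := by
  simp [PySem.Chars.startswith, List.isPrefixOf]

theorem get?_mk_nil (x : String) : (PySem.Dict.mk ([] : List (String × String))).get? x = none := rfl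

theorem flip_up (c a : Char) : (PySem.Chars.upperChar c = a) = (a = PySem.Chars.upperChar c) :=
  propext ⟨Eq.symm, Eq.symm⟩

theorem single_mk : pvSingleChar = PySem.Dict.mk
    [ ("R", "resistor"), ("C", "capacitor"), ("L", "inductor"), ("D", "diode"),
      ("Q", "transistor"), ("Y", "crystal_oscillator"), ("X", "crystal_oscillator"),
      ("J", "connector") ] := by decide

theorem kw_gen (x1 x2 x3 x4 x5 x6 x7 x8 x9 x10 x11 : Bool) :
    (if (x1 || (x2 || false)) = true then "timer_ic"
     else if (x3 || (x4 || (x5 || (x6 || (x7 || false))))) = true then "microcontroller"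
     else if (x8 || (x9 || false)) = true then "voltage_regulator"
     else if (x10 || (x11 || false)) = true then "opamp"
     else "ic")
    = (if x1 = true then "timer_ic" else if x2 = true then "timer_ic"
       else if x3 = true then "microcontroller" else if x4 = true then "microcontroller"
       else if x5 = true then "microcontroller" else if x6 = true then "microcontroller"
       else if x7 = true then "microcontroller"
       else if x8 = true then "voltage_regulator" else if x9 = true then "voltage_regulator"
       else if x10 = true then "opamp" else if x11 = true then "opamp"
       else "ic") := by
  revert x1 x2 x3 x4 x5 x6 x7 x8 x9 x10 x11
  decide

theorem kw_eq (s : String) :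
    (if (["555", "timer"] : List String).any (fun kw => PySem.Str.isIn kw s) then "timer_ic"
     else if (["stm32", "esp32", "atmega", "pic", "mcu"] : List String).any (fun kw => PySem.Str.isIn kw s) then "microcontroller"
     else if (["regulator", "ldo"] : List String).any (fun kw => PySem.Str.isIn kw s) then "voltage_regulator"
     else if (["opamp", "amplifier"] : List String).any (fun kw => PySem.Str.isIn kw s) then "opamp"
     else "ic") = pvFirstKw s pvKeywords := by
  simp only [pvKeywords, pvFirstKw, List.any_cons, List.any_nil]
  exact kw_gen _ _ _ _ _ _ _ _ _ _ _

set_option maxHeartbeats 1000000 in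
theorem tail_gen (d1 d2 : Char) (b : Bool) (w : String) :
    (if 'U' = d1 then w
     else if 'R' = d1 then "resistor"
     else if 'C' = d1 then "capacitor"
     else if 'L' = d1 then "inductor"
     else if 'D' = d1 then "diode"
     else if 'Q' = d1 then "transistor"
     else if 'Y' = d1 ∨ 'X' = d1 then "crystal_oscillator"
     else if 'J' = d1 then "connector"
     else if 'S' = d1 ∧ 'W' = d2 then "switch"
     else if 'L' = d1 ∧ 'E' = d2 ∧ b = true then "led"
     else if 'T' = d1 ∧ 'P' = d2 then "test_point"
     else "unknown") =
    (if 'U' = d1 then w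
     else
      (if 'R' = d1 then some "resistor"
       else if 'C' = d1 then some "capacitor"
       else if 'L' = d1 then some "inductor"
       else if 'D' = d1 then some "diode"
       else if 'Q' = d1 then some "transistor"
       else if 'Y' = d1 then some "crystal_oscillator"
       else if 'X' = d1 then some "crystal_oscillator"
       else if 'J' = d1 then some "connector"
       else none).getD
        (if 'S' = d1 ∧ 'W' = d2 then "switch"
         else if 'T' = d1 ∧ 'P' = d2 then "test_point"
         else "unknown")) := by
  split_ifs <;> first | rfl | tauto

-- ===== VERDICT =====
set_option maxHeartbeats 1000000 in
set_option maxRecDepth 4000 in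
theorem classify_component_py_spec : Claim_equal_classify_component_py := by
  intro ref lib_id _
  unfold Spec_classify_component_py
  unfold classify_component_py classify_component_py_alt
  rw [single_mk]
  simp only [kw_eq]
  rw [← String.ofList_toList (s := ref)]
  generalize ref.toList = l
  match l with
  | [] =>
    simp only [String.toList_ofList, str_beq_toList, PySem.Dict.get?_mk_cons, get?_mk_nil,
      PySem.Str.startswith_eq, PySem.Str.toList_upper, PySem.Str.toList_slice,
      PySem.Chars.slice_eq_listSlice]
    rw [show PySem.List.slice ([]:List Char) none (some 1) = ([]:List Char) from by simp [pysem],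
        show PySem.List.slice ([]:List Char) (some 1) (some 2) = ([]:List Char) from by simp [pysem]]
    simp only [tl_U, tl_R, tl_C, tl_L, tl_D, tl_Q, tl_Y, tl_X, tl_J, tl_S, tl_W, tl_T, tl_P, tl_SW, tl_LED, tl_TP]
    simp only [PySem.Chars.upper, List.map_nil]
    simp only [sw_cons, sw_nilp, sw_nil]
    simp only [List.cons.injEq, and_true, decide_eq_true_eq, Bool.and_eq_true, Bool.or_eq_true,
      beq_iff_eq, Bool.and_true, Bool.and_false, Bool.or_false]
    split_ifs <;> simp_all [eq_comm, Option.map, Option.getD]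
  | [c] =>
    simp only [String.toList_ofList, str_beq_toList, PySem.Dict.get?_mk_cons, get?_mk_nil, PySem.Str.startswith_eq,
      PySem.Str.toList_upper, PySem.Str.toList_slice, PySem.Chars.slice_eq_listSlice]
    rw [show PySem.List.slice [c] none (some 1) = [c] from by simp [pysem],
        show PySem.List.slice [c] (some 1) (some 2) = ([]:List Char) from by simp [pysem]]
    simp only [tl_U, tl_R, tl_C, tl_L, tl_D, tl_Q, tl_Y, tl_X, tl_J, tl_S, tl_W, tl_T, tl_P, tl_SW, tl_LED, tl_TP]
    simp only [PySem.Chars.upper, List.map_cons, List.map_nil]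
    simp only [sw_cons, sw_nilp, sw_nil]
    simp only [List.cons.injEq, and_true, decide_eq_true_eq, Bool.and_eq_true, Bool.or_eq_true,
      beq_iff_eq, Bool.and_true, Bool.and_false, Bool.or_false]
    split_ifs <;> simp_all [eq_comm, Option.map, Option.getD]
  | c1 :: c2 :: t =>
    simp only [String.toList_ofList, str_beq_toList, PySem.Dict.get?_mk_cons, get?_mk_nil, PySem.Str.startswith_eq,
      PySem.Str.toList_upper, PySem.Str.toList_slice, PySem.Chars.slice_eq_listSlice]
    rw [show PySem.List.slice (c1::c2::t) none (some 1) = [c1] from by simp [pysem],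
        show PySem.List.slice (c1::c2::t) (some 1) (some 2) = [c2] from by simp [pysem]]
    simp only [tl_U, tl_R, tl_C, tl_L, tl_D, tl_Q, tl_Y, tl_X, tl_J, tl_S, tl_W, tl_T, tl_P, tl_SW, tl_LED, tl_TP]
    simp only [PySem.Chars.upper, List.map_cons, List.map_nil]
    simp only [sw_cons, sw_nilp, sw_nil]
    simp only [List.cons.injEq, and_true, decide_eq_true_eq, Bool.and_eq_true, Bool.or_eq_true,
      beq_iff_eq, Bool.and_true, Bool.and_false, Bool.or_false, flip_up]
    exact tail_gen (PySem.Chars.upperChar c1) (PySem.Chars.upperChar c2)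
      (PySem.Chars.startswith (List.map PySem.Chars.upperChar t) ['D'])
      (pvFirstKw (PySem.Str.lower lib_id) pvKeywords)
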